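-- pv_equiv track=rewrite | github.com/nobe0716/problem_solving | codeforces/contests/1195/A. Drinks Choosing.py | solve
-- ===== SOURCE A (Python) =====
-- from collections import Counter
--
-- def solve(n, k, a):
--     c = Counter(a)
--     r = 0
--     rests = 0
--     for k, v in c.items():
--         r += (v // 2 * 2)
--         rests += (v % 2)
--     return r + (rests + 1) // 2
-- ===== SOURCE B (Python) =====
-- def solve(n, k, a):
--     s = sorted(a)
--     i = 0
--     matched = 0
--     while i + 1 < len(s):
--         if s[i] == s[i + 1]:
--             matched += 2
--             i += 2
--         else:
--             i += 1
--     return matched + (len(s) - matched + 1) // 2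
-- ===== Notes on version B (the rewrite author's own statement) =====
-- stated objective: alternative
-- what changed: B replaces A's Counter with per-type even/odd accumulators by sorting the list and greedily pairing adjacent equal elements in one linear scan, then taking ceil over the unmatched leftovers.
import Mathlib
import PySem

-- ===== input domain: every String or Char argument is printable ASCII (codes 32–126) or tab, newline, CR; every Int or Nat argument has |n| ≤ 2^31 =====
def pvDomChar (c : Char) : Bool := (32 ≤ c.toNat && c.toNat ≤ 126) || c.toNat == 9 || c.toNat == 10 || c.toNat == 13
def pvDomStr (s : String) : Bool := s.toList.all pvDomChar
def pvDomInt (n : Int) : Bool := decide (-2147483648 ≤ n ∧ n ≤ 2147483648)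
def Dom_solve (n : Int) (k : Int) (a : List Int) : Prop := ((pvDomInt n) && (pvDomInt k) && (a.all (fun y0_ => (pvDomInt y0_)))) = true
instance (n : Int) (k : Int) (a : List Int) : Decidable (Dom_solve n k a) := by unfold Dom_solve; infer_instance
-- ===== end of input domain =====

-- B sorts the list and greedily pairs adjacent equal elements with a linear scan,
-- replacing A's Counter and per-type accumulators (objective: alternative).


-- ===== PORT A =====
def solve (n : Int) (k : Int) (a : List Int) : Int :=
  let c := PySem.Dict.counter a
  let p := c.items.foldl
    (fun (p : Int × Int) kv =>
      (p.1 + PySem.Int.floordiv kv.2 2 * 2, p.2 + PySem.Int.mod kv.2 2))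
    ((0 : Int), (0 : Int))
  p.1 + PySem.Int.floordiv (p.2 + 1) 2

-- ===== PORT B =====
-- B's while-loop over indices i, i+1 of the sorted list, as the obvious structural
-- recursion over the sorted list: look at the next two elements, pair or skip.
def pairScan : List Int → Int
  | x :: y :: rest => if x == y then 2 + pairScan rest else pairScan (y :: rest)
  | _ => 0

def solve_alt (n : Int) (k : Int) (a : List Int) : Int :=
  let s := PySem.List.sorted a id false
  let matched := pairScan s
  matched + PySem.Int.floordiv ((s.length : Int) - matched + 1) 2

-- ===== PRECONDITION & SPEC =====
def Spec_solve (n : Int) (k : Int) (a : List Int) (out : Int) : Prop := out = solve_alt n k a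
instance (n : Int) (k : Int) (a : List Int) (out : Int) : Decidable (Spec_solve n k a out) := by unfold Spec_solve; infer_instance

-- ===== CLAIM (what is proved, stated in full; the proofs are below) =====
def Claim_equal_solve : Prop := ∀ (n : Int) (k : Int) (a : List Int), Dom_solve n k a → Spec_solve n k a (solve n k a)

-- ===== LEMMAS AND PROOFS =====

-- number of value types with odd multiplicity, as an Int sum over the dedup
def oddsI (s : List Int) : Int := (s.dedup.map (fun x => (s.count x : Int) % 2)).sum

-- A's fold computes the two sums over the values.
theorem foldA_eq (l : List (Int × Int)) : ∀ (r rests : Int),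
    l.foldl (fun (p : Int × Int) kv =>
      (p.1 + PySem.Int.floordiv kv.2 2 * 2, p.2 + PySem.Int.mod kv.2 2)) (r, rests)
    = (r + (l.map (fun kv => PySem.Int.floordiv kv.2 2 * 2)).sum,
       rests + (l.map (fun kv => PySem.Int.mod kv.2 2)).sum) := by
  induction l with
  | nil => simp
  | cons hd tl ih =>
    intro r rests
    simp only [List.foldl_cons, List.map_cons, List.sum_cons, ih, Prod.mk.injEq]
    exact ⟨by ring, by ring⟩

-- The counter's values sum to the length of the list.
theorem sum_counts (a : List Int) :
    (((PySem.Set.ofList a).map (fun x => (a.count x : Int)))).sum = (a.length : Int) := by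
  have hperm : (PySem.Set.ofList a).Perm a.dedup := by
    rw [List.perm_ext_iff_of_nodup (PySem.Set.nodup_ofList a) a.nodup_dedup]
    intro x; rw [PySem.Set.mem_ofList, List.mem_dedup]
  rw [(hperm.map (fun x => (a.count x : Int))).sum_eq]
  have h2 : (a.dedup.map (fun x => (a.count x : Int)))
      = (a.dedup.map a.count).map (fun m : Nat => (m : Int)) := by
    simp [List.map_map]
  rw [h2, ← Nat.cast_list_sum, List.sum_map_count_dedup_eq_length]

-- the even parts sum to (total) - (sum of the remainders)
theorem sum_split (s : List Int) (c : Int → Int) :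
    (s.map (fun x => PySem.Int.floordiv (c x) 2 * 2)).sum
      = (s.map c).sum - (s.map (fun x => PySem.Int.mod (c x) 2)).sum := by
  induction s with
  | nil => simp
  | cons hd tl ih =>
    simp only [List.map_cons, List.sum_cons, ih]
    have := PySem.Int.floordiv_mul_add_mod (c hd) 2
    omega

-- A's M (sum of PySem mods over the counter's key set) equals oddsI of the list.
theorem M_eq_oddsI (a : List Int) :
    ((PySem.Set.ofList a).map (fun x => PySem.Int.mod ((a.count x : Nat) : Int) 2)).sum
      = oddsI a := by
  have hperm : (PySem.Set.ofList a).Perm a.dedup := by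
    rw [List.perm_ext_iff_of_nodup (PySem.Set.nodup_ofList a) a.nodup_dedup]
    intro x; rw [PySem.Set.mem_ofList, List.mem_dedup]
  unfold oddsI
  rw [(hperm.map _).sum_eq]
  refine congrArg List.sum (List.map_congr_left ?_)
  intro x _
  exact PySem.Int.mod_eq_emod_of_pos (by norm_num)

-- oddsI is invariant under permutation
theorem oddsI_perm {s t : List Int} (h : s.Perm t) : oddsI s = oddsI t := by
  unfold oddsI
  rw [(h.dedup.map (fun x => (s.count x : Int) % 2)).sum_eq]
  refine congrArg List.sum (List.map_congr_left ?_)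
  intro x _
  rw [h.count_eq]

-- key lemma: for a sorted list, the greedy adjacent pairing matches everything
-- except one leftover per odd-multiplicity value.
theorem pairScan_sorted (s : List Int) :
    s.Pairwise (· ≤ ·) → pairScan s = (s.length : Int) - oddsI s := by
  induction s using pairScan.induct with
  | case1 x y rest hxy ih =>
    intro h
    have hxy' : x = y := by simpa using hxy
    subst hxy'
    have htail : (x :: rest).Pairwise (· ≤ ·) := (List.pairwise_cons.1 h).2
    have hrest : rest.Pairwise (· ≤ ·) := (List.pairwise_cons.1 htail).2
    have hodds : oddsI (x :: x :: rest) = oddsI rest := by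
      unfold oddsI
      by_cases hx : x ∈ rest
      · rw [List.dedup_cons_of_mem (by simp), List.dedup_cons_of_mem hx]
        refine congrArg List.sum (List.map_congr_left ?_)
        intro z _
        by_cases hz : z = x
        · subst hz; simp [List.count_cons]; omega
        · simp [List.count_cons, Ne.symm hz]
      · rw [List.dedup_cons_of_mem (by simp), List.dedup_cons_of_notMem hx,
            List.map_cons, List.sum_cons]
        have hcx : (x :: x :: rest).count x = 2 := by
          simp [List.count_cons, List.count_eq_zero_of_not_mem hx]
        rw [hcx]
        have heq : ((rest.dedup).map (fun z => ((x :: x :: rest).count z : Int) % 2))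
            = (rest.dedup.map (fun z => (rest.count z : Int) % 2)) := by
          refine List.map_congr_left ?_
          intro z hz
          have hzx : z ≠ x := fun hzz => hx (hzz ▸ List.mem_dedup.1 hz)
          simp [List.count_cons, Ne.symm hzx]
        rw [heq]; norm_num
    simp only [pairScan, if_pos (by simp : (x == x) = true)]
    rw [ih hrest, hodds]
    simp; ring
  | case2 x y rest hxy ih =>
    intro h
    have hxy' : x ≠ y := by simpa using hxy
    have htail : (y :: rest).Pairwise (· ≤ ·) := (List.pairwise_cons.1 h).2
    have hxle : ∀ z ∈ y :: rest, x ≤ z := (List.pairwise_cons.1 h).1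
    have hyle : ∀ z ∈ rest, y ≤ z := (List.pairwise_cons.1 htail).1
    have hxnot : x ∉ y :: rest := by
      intro hx
      rcases List.mem_cons.1 hx with h1 | h1
      · exact hxy' h1
      · exact hxy' (le_antisymm (hxle y (by simp)) (hyle x h1))
    have hodds : oddsI (x :: y :: rest) = 1 + oddsI (y :: rest) := by
      unfold oddsI
      rw [List.dedup_cons_of_notMem hxnot, List.map_cons, List.sum_cons]
      have hcx : (x :: y :: rest).count x = 1 := by
        simp [List.count_cons, List.count_eq_zero_of_not_mem hxnot]
      rw [hcx]
      have heq : ((y :: rest).dedup.map (fun z => ((x :: y :: rest).count z : Int) % 2))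
          = ((y :: rest).dedup.map (fun z => ((y :: rest).count z : Int) % 2)) := by
        refine List.map_congr_left ?_
        intro z hz
        have hzx : z ≠ x := fun hzz => hxnot (hzz ▸ List.mem_dedup.1 hz)
        simp [List.count_cons, Ne.symm hzx]
      rw [heq]; norm_num
    simp only [pairScan]
    rw [ih htail, hodds]
    rw [if_neg hxy]
    simp; ring
  | case3 t h1 =>
    intro _
    rcases t with _ | ⟨x, _ | ⟨y, rest⟩⟩
    · simp [pairScan, oddsI]
    · simp [pairScan, oddsI]
    · exact (h1 x y rest rfl).elim

-- ===== VERDICT (by name: the statement is the Claim_ definition above) =====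
theorem solve_spec : Claim_equal_solve := by
  intro n k a _
  unfold Spec_solve solve solve_alt
  simp only [foldA_eq, zero_add]
  have hitems := PySem.Dict.items_counter (κ := Int) a
  rw [hitems]
  simp only [List.map_map, Function.comp_def]
  rw [sum_split (PySem.Set.ofList a) (fun x => ((a.count x : Nat) : Int)), sum_counts a,
      M_eq_oddsI a]
  have hperm : (PySem.List.sorted a id false).Perm a := PySem.List.sorted_perm a id false
  have hpair := pairScan_sorted (PySem.List.sorted a id false)
    (by simpa using PySem.List.sorted_pairwise a id)
  rw [hpair, oddsI_perm hperm, hperm.length_eq]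
  rw [PySem.Int.floordiv_eq_ediv_of_pos (b := 2) (by norm_num),
      PySem.Int.floordiv_eq_ediv_of_pos (b := 2) (by norm_num)]
  omega
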